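-- pv_equiv track=rewrite | github.com/iszh2023/AI-Stock-Analysis | math-problem-generator.py | topic_buckets_for_grade
-- ===== SOURCE A (Python) =====
-- def subjects_for_grade(grade):
--     g = grade.lower()
--     if "pre-k" in g:          return ["Counting", "Shapes", "Compare Numbers", "Time (to hour)"]
--     if "kinder" in g or g == "k":
--         return ["Counting", "Shapes", "Compare Numbers", "Addition", "Subtraction", "Time (to hour)", "Money (coins)"]
--     if any(x in g for x in ["1st", "2nd", "3rd"]):
--         return ["Addition", "Subtraction", "Place Value", "Time (to hour)", "Money (coins)"]
--     if any(x in g for x in ["4th", "5th"]):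
--         return ["Addition", "Subtraction", "Multiplication", "Division", "Factors", "Multiples",
--                 "Fractions", "Time (to hour)", "Money (coins)"]
--     if any(x in g for x in ["6th", "7th", "8th"]):
--         return ["Integers (+/−)", "Multiplication", "Division", "Fractions", "Decimals", "Percentages", "Ratios",
--                 "Time (to hour)", "Money (coins)"]
--     if "9th" in g:
--         return ["Linear Eq (solve x)", "Evaluate Expr", "Inequalities", "Proportions",
--                 "Functions (f(x))", "Pythagorean (int)", "Quadratics (roots)", "Factoring"]
--     if "10th" in g:
--         return ["Angles (sum)", "Area (rect/tri)", "Pythagorean (int)", "Quadratics (roots)",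
--                 "Systems (2x2)", "Exponents", "Factoring", "Functions (f(x))", "Trig Basics (sin 30)"]
--     if "11th" in g:
--         return ["Sequences (an)", "Functions (f(x))", "Exponents", "Quadratics (roots)",
--                 "Systems (2x2)", "Factoring", "Trig Basics (sin 30)", "Inequalities"]
--     if "12th" in g:
--         return ["Sequences (an)", "Functions (f(x))", "Trig Basics (sin 30)",
--                 "Derivative (poly)", "Limits (int)", "Slope at a point"]
--     if "prealgebra" in g:
--         return ["Integers (+/−)", "Exponents", "Order of Ops", "Fractions", "Ratios"]
--     if "algebra 2" in g:
--         return ["Quadratics (roots)", "Exponents", "Systems (2x2)", "Factoring"]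
--     if "algebra" in g:
--         return ["Linear Eq (solve x)", "Evaluate Expr", "Inequalities", "Proportions"]
--     if "geometry" in g:
--         return ["Area (rect/tri)", "Perimeter", "Angles (sum)", "Pythagorean (int)"]
--     if "precalculus" in g:
--         return ["Sequences (an)", "Functions (f(x))", "Trig Basics (sin 30)"]
--     if "calculus" in g:
--         return ["Derivative (poly)", "Limits (int)", "Slope at a point"]
--     return ["Addition", "Subtraction", "Multiplication", "Division"]
--
-- def topic_buckets_for_grade(grade):
--     subs = subjects_for_grade(grade)
--     easy = [s for s in subs if s in {
--         "Counting", "Shapes", "Compare Numbers", "Addition", "Subtraction",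
--         "Place Value", "Time (to hour)", "Money (coins)", "Perimeter", "Sequences (an)", "Slope at a point"
--     }]
--     medium = [s for s in subs if s in {
--         "Multiplication", "Division", "Fractions", "Decimals", "Percentages", "Ratios",
--         "Factors", "Multiples", "Area (rect/tri)", "Angles (sum)", "Linear Eq (solve x)",
--         "Evaluate Expr", "Proportions", "Functions (f(x))", "Pythagorean (int)"
--     }]
--     hard = [s for s in subs if s in {
--         "Exponents", "Order of Ops", "Quadratics (roots)", "Systems (2x2)", "Factoring",
--         "Inequalities", "Derivative (poly)", "Limits (int)", "Trig Basics (sin 30)"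
--     }]
--     rest = [s for s in subs if s not in easy + medium + hard]
--     medium += rest
--     return {"easy": easy, "medium": medium, "hard": hard}
-- ===== SOURCE B (Python) =====
-- def subjects_for_grade(grade):
--     g = grade.lower()
--     if "pre-k" in g:          return ["Counting", "Shapes", "Compare Numbers", "Time (to hour)"]
--     if "kinder" in g or g == "k":
--         return ["Counting", "Shapes", "Compare Numbers", "Addition", "Subtraction", "Time (to hour)", "Money (coins)"]
--     if any(x in g for x in ["1st", "2nd", "3rd"]):
--         return ["Addition", "Subtraction", "Place Value", "Time (to hour)", "Money (coins)"]
--     if any(x in g for x in ["4th", "5th"]):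
--         return ["Addition", "Subtraction", "Multiplication", "Division", "Factors", "Multiples",
--                 "Fractions", "Time (to hour)", "Money (coins)"]
--     if any(x in g for x in ["6th", "7th", "8th"]):
--         return ["Integers (+/−)", "Multiplication", "Division", "Fractions", "Decimals", "Percentages", "Ratios",
--                 "Time (to hour)", "Money (coins)"]
--     if "9th" in g:
--         return ["Linear Eq (solve x)", "Evaluate Expr", "Inequalities", "Proportions",
--                 "Functions (f(x))", "Pythagorean (int)", "Quadratics (roots)", "Factoring"]
--     if "10th" in g:
--         return ["Angles (sum)", "Area (rect/tri)", "Pythagorean (int)", "Quadratics (roots)",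
--                 "Systems (2x2)", "Exponents", "Factoring", "Functions (f(x))", "Trig Basics (sin 30)"]
--     if "11th" in g:
--         return ["Sequences (an)", "Functions (f(x))", "Exponents", "Quadratics (roots)",
--                 "Systems (2x2)", "Factoring", "Trig Basics (sin 30)", "Inequalities"]
--     if "12th" in g:
--         return ["Sequences (an)", "Functions (f(x))", "Trig Basics (sin 30)",
--                 "Derivative (poly)", "Limits (int)", "Slope at a point"]
--     if "prealgebra" in g:
--         return ["Integers (+/−)", "Exponents", "Order of Ops", "Fractions", "Ratios"]
--     if "algebra 2" in g:
--         return ["Quadratics (roots)", "Exponents", "Systems (2x2)", "Factoring"]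
--     if "algebra" in g:
--         return ["Linear Eq (solve x)", "Evaluate Expr", "Inequalities", "Proportions"]
--     if "geometry" in g:
--         return ["Area (rect/tri)", "Perimeter", "Angles (sum)", "Pythagorean (int)"]
--     if "precalculus" in g:
--         return ["Sequences (an)", "Functions (f(x))", "Trig Basics (sin 30)"]
--     if "calculus" in g:
--         return ["Derivative (poly)", "Limits (int)", "Slope at a point"]
--     return ["Addition", "Subtraction", "Multiplication", "Division"]
--
-- _BUCKET_OF = {}
-- for _s in ["Counting", "Shapes", "Compare Numbers", "Addition", "Subtraction",
--            "Place Value", "Time (to hour)", "Money (coins)", "Perimeter",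
--            "Sequences (an)", "Slope at a point"]:
--     _BUCKET_OF[_s] = "easy"
-- for _s in ["Multiplication", "Division", "Fractions", "Decimals", "Percentages", "Ratios",
--            "Factors", "Multiples", "Area (rect/tri)", "Angles (sum)", "Linear Eq (solve x)",
--            "Evaluate Expr", "Proportions", "Functions (f(x))", "Pythagorean (int)"]:
--     _BUCKET_OF[_s] = "medium"
-- for _s in ["Exponents", "Order of Ops", "Quadratics (roots)", "Systems (2x2)", "Factoring",
--            "Inequalities", "Derivative (poly)", "Limits (int)", "Trig Basics (sin 30)"]:
--     _BUCKET_OF[_s] = "hard"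
--
-- def topic_buckets_for_grade(grade):
--     easy, medium, hard, rest = [], [], [], []
--     for s in subjects_for_grade(grade):
--         b = _BUCKET_OF.get(s)
--         if b == "easy":
--             easy.append(s)
--         elif b == "medium":
--             medium.append(s)
--         elif b == "hard":
--             hard.append(s)
--         else:
--             rest.append(s)
--     medium += rest
--     return {"easy": easy, "medium": medium, "hard": hard}
-- ===== Notes on version B (the rewrite author's own statement) =====
-- stated objective: simpler
-- what changed: Replaces A's four separate filter passes (the last rescanning the concatenation of the first three lists per element) with one subject->bucket dict built once and a single classifying pass over the subjects, unknown subjects collected in a rest list appended to medium at the end.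
import Mathlib
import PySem

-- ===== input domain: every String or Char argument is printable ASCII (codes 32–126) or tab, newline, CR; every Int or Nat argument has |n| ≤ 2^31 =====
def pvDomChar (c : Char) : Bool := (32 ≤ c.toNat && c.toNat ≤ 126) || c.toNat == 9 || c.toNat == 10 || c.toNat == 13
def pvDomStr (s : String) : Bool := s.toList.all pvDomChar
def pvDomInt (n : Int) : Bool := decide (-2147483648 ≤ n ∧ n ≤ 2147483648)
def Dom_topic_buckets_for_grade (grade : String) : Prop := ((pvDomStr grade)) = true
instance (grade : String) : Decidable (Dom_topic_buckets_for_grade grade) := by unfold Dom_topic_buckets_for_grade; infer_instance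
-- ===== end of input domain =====

-- B replaces A's four filter passes (plus list-membership rescans) with one dict of
-- subject→bucket and a single pass over the subjects; objective: simpler. Equivalence is total.
-- ===== PORT A =====
-- the body of subjects_for_grade after "g = grade.lower()" (split out so the if-chain is at top level)
def subjects_for_lowered (g : String) : List String :=
  if PySem.Str.isIn "pre-k" g then ["Counting", "Shapes", "Compare Numbers", "Time (to hour)"]
  else if PySem.Str.isIn "kinder" g || g == "k" then ["Counting", "Shapes", "Compare Numbers", "Addition", "Subtraction", "Time (to hour)", "Money (coins)"]
  else if ["1st", "2nd", "3rd"].any (fun x => PySem.Str.isIn x g) then ["Addition", "Subtraction", "Place Value", "Time (to hour)", "Money (coins)"]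
  else if ["4th", "5th"].any (fun x => PySem.Str.isIn x g) then ["Addition", "Subtraction", "Multiplication", "Division", "Factors", "Multiples", "Fractions", "Time (to hour)", "Money (coins)"]
  else if ["6th", "7th", "8th"].any (fun x => PySem.Str.isIn x g) then ["Integers (+/−)", "Multiplication", "Division", "Fractions", "Decimals", "Percentages", "Ratios", "Time (to hour)", "Money (coins)"]
  else if PySem.Str.isIn "9th" g then ["Linear Eq (solve x)", "Evaluate Expr", "Inequalities", "Proportions", "Functions (f(x))", "Pythagorean (int)", "Quadratics (roots)", "Factoring"]
  else if PySem.Str.isIn "10th" g then ["Angles (sum)", "Area (rect/tri)", "Pythagorean (int)", "Quadratics (roots)", "Systems (2x2)", "Exponents", "Factoring", "Functions (f(x))", "Trig Basics (sin 30)"]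
  else if PySem.Str.isIn "11th" g then ["Sequences (an)", "Functions (f(x))", "Exponents", "Quadratics (roots)", "Systems (2x2)", "Factoring", "Trig Basics (sin 30)", "Inequalities"]
  else if PySem.Str.isIn "12th" g then ["Sequences (an)", "Functions (f(x))", "Trig Basics (sin 30)", "Derivative (poly)", "Limits (int)", "Slope at a point"]
  else if PySem.Str.isIn "prealgebra" g then ["Integers (+/−)", "Exponents", "Order of Ops", "Fractions", "Ratios"]
  else if PySem.Str.isIn "algebra 2" g then ["Quadratics (roots)", "Exponents", "Systems (2x2)", "Factoring"]
  else if PySem.Str.isIn "algebra" g then ["Linear Eq (solve x)", "Evaluate Expr", "Inequalities", "Proportions"]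
  else if PySem.Str.isIn "geometry" g then ["Area (rect/tri)", "Perimeter", "Angles (sum)", "Pythagorean (int)"]
  else if PySem.Str.isIn "precalculus" g then ["Sequences (an)", "Functions (f(x))", "Trig Basics (sin 30)"]
  else if PySem.Str.isIn "calculus" g then ["Derivative (poly)", "Limits (int)", "Slope at a point"]
  else ["Addition", "Subtraction", "Multiplication", "Division"]

def subjects_for_grade (grade : String) : List String :=
  subjects_for_lowered (PySem.Str.lower grade)

def topic_buckets_for_grade (grade : String) : List (String × List String) :=
  let subs := subjects_for_grade grade
  let easy := subs.filter (fun s => (["Counting", "Shapes", "Compare Numbers", "Addition", "Subtraction", "Place Value", "Time (to hour)", "Money (coins)", "Perimeter", "Sequences (an)", "Slope at a point"] : List String).contains s)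
  let medium := subs.filter (fun s => (["Multiplication", "Division", "Fractions", "Decimals", "Percentages", "Ratios", "Factors", "Multiples", "Area (rect/tri)", "Angles (sum)", "Linear Eq (solve x)", "Evaluate Expr", "Proportions", "Functions (f(x))", "Pythagorean (int)"] : List String).contains s)
  let hard := subs.filter (fun s => (["Exponents", "Order of Ops", "Quadratics (roots)", "Systems (2x2)", "Factoring", "Inequalities", "Derivative (poly)", "Limits (int)", "Trig Basics (sin 30)"] : List String).contains s)
  let rest := subs.filter (fun s => !((easy ++ medium ++ hard).contains s))
  let medium := medium ++ rest
  [("easy", easy), ("medium", medium), ("hard", hard)]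

-- ===== PORT B =====
-- B-side: one dict mapping each subject to its bucket name (Source B builds it once at module load)
def bucketOf : PySem.Dict String String :=
  PySem.Dict.ofList
    ((["Counting", "Shapes", "Compare Numbers", "Addition", "Subtraction", "Place Value", "Time (to hour)", "Money (coins)", "Perimeter", "Sequences (an)", "Slope at a point"] : List String).map (fun s => (s, "easy")) ++
     (["Multiplication", "Division", "Fractions", "Decimals", "Percentages", "Ratios", "Factors", "Multiples", "Area (rect/tri)", "Angles (sum)", "Linear Eq (solve x)", "Evaluate Expr", "Proportions", "Functions (f(x))", "Pythagorean (int)"] : List String).map (fun s => (s, "medium")) ++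
     (["Exponents", "Order of Ops", "Quadratics (roots)", "Systems (2x2)", "Factoring", "Inequalities", "Derivative (poly)", "Limits (int)", "Trig Basics (sin 30)"] : List String).map (fun s => (s, "hard")))

def topic_buckets_for_grade_alt (grade : String) : List (String × List String) :=
  let st := (subjects_for_grade grade).foldl
    (fun acc s =>
      match PySem.Dict.get? bucketOf s with
      | some "easy" => (acc.1 ++ [s], acc.2.1, acc.2.2.1, acc.2.2.2)
      | some "medium" => (acc.1, acc.2.1 ++ [s], acc.2.2.1, acc.2.2.2)
      | some "hard" => (acc.1, acc.2.1, acc.2.2.1 ++ [s], acc.2.2.2)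
      | _ => (acc.1, acc.2.1, acc.2.2.1, acc.2.2.2 ++ [s]))
    (([], [], [], []) : List String × List String × List String × List String)
  [("easy", st.1), ("medium", st.2.1 ++ st.2.2.2), ("hard", st.2.2.1)]

-- ===== PRECONDITION & SPEC =====
def Spec_topic_buckets_for_grade (grade : String) (out : List (String × List String)) : Prop := out = topic_buckets_for_grade_alt grade
instance (grade : String) (out : List (String × List String)) : Decidable (Spec_topic_buckets_for_grade grade out) := by unfold Spec_topic_buckets_for_grade; infer_instance

-- ===== CLAIM =====
def Claim_equal_topic_buckets_for_grade : Prop := ∀ (grade : String), Dom_topic_buckets_for_grade grade → Spec_topic_buckets_for_grade grade (topic_buckets_for_grade grade)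

-- ===== LEMMAS AND PROOFS =====
set_option maxRecDepth 16000
set_option maxHeartbeats 1600000

theorem subs_cases (g : String) :
    subjects_for_grade g = ["Counting", "Shapes", "Compare Numbers", "Time (to hour)"] ∨
    subjects_for_grade g = ["Counting", "Shapes", "Compare Numbers", "Addition", "Subtraction", "Time (to hour)", "Money (coins)"] ∨
    subjects_for_grade g = ["Addition", "Subtraction", "Place Value", "Time (to hour)", "Money (coins)"] ∨
    subjects_for_grade g = ["Addition", "Subtraction", "Multiplication", "Division", "Factors", "Multiples", "Fractions", "Time (to hour)", "Money (coins)"] ∨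
    subjects_for_grade g = ["Integers (+/−)", "Multiplication", "Division", "Fractions", "Decimals", "Percentages", "Ratios", "Time (to hour)", "Money (coins)"] ∨
    subjects_for_grade g = ["Linear Eq (solve x)", "Evaluate Expr", "Inequalities", "Proportions", "Functions (f(x))", "Pythagorean (int)", "Quadratics (roots)", "Factoring"] ∨
    subjects_for_grade g = ["Angles (sum)", "Area (rect/tri)", "Pythagorean (int)", "Quadratics (roots)", "Systems (2x2)", "Exponents", "Factoring", "Functions (f(x))", "Trig Basics (sin 30)"] ∨
    subjects_for_grade g = ["Sequences (an)", "Functions (f(x))", "Exponents", "Quadratics (roots)", "Systems (2x2)", "Factoring", "Trig Basics (sin 30)", "Inequalities"] ∨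
    subjects_for_grade g = ["Sequences (an)", "Functions (f(x))", "Trig Basics (sin 30)", "Derivative (poly)", "Limits (int)", "Slope at a point"] ∨
    subjects_for_grade g = ["Integers (+/−)", "Exponents", "Order of Ops", "Fractions", "Ratios"] ∨
    subjects_for_grade g = ["Quadratics (roots)", "Exponents", "Systems (2x2)", "Factoring"] ∨
    subjects_for_grade g = ["Linear Eq (solve x)", "Evaluate Expr", "Inequalities", "Proportions"] ∨
    subjects_for_grade g = ["Area (rect/tri)", "Perimeter", "Angles (sum)", "Pythagorean (int)"] ∨
    subjects_for_grade g = ["Sequences (an)", "Functions (f(x))", "Trig Basics (sin 30)"] ∨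
    subjects_for_grade g = ["Derivative (poly)", "Limits (int)", "Slope at a point"] ∨
    subjects_for_grade g = ["Addition", "Subtraction", "Multiplication", "Division"] := by
  unfold subjects_for_grade subjects_for_lowered
  by_cases h0 : PySem.Str.isIn "pre-k" (PySem.Str.lower g) = true
  · rw [if_pos h0]; exact Or.inl rfl
  rw [if_neg h0]
  by_cases h1 : (PySem.Str.isIn "kinder" (PySem.Str.lower g) || PySem.Str.lower g == "k") = true
  · rw [if_pos h1]; exact Or.inr (Or.inl rfl)
  rw [if_neg h1]
  by_cases h2 : (["1st", "2nd", "3rd"].any fun x => PySem.Str.isIn x (PySem.Str.lower g)) = true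
  · rw [if_pos h2]; exact Or.inr (Or.inr (Or.inl rfl))
  rw [if_neg h2]
  by_cases h3 : (["4th", "5th"].any fun x => PySem.Str.isIn x (PySem.Str.lower g)) = true
  · rw [if_pos h3]; exact Or.inr (Or.inr (Or.inr (Or.inl rfl)))
  rw [if_neg h3]
  by_cases h4 : (["6th", "7th", "8th"].any fun x => PySem.Str.isIn x (PySem.Str.lower g)) = true
  · rw [if_pos h4]; exact Or.inr (Or.inr (Or.inr (Or.inr (Or.inl rfl))))
  rw [if_neg h4]
  by_cases h5 : PySem.Str.isIn "9th" (PySem.Str.lower g) = true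
  · rw [if_pos h5]; exact Or.inr (Or.inr (Or.inr (Or.inr (Or.inr (Or.inl rfl)))))
  rw [if_neg h5]
  by_cases h6 : PySem.Str.isIn "10th" (PySem.Str.lower g) = true
  · rw [if_pos h6]; exact Or.inr (Or.inr (Or.inr (Or.inr (Or.inr (Or.inr (Or.inl rfl))))))
  rw [if_neg h6]
  by_cases h7 : PySem.Str.isIn "11th" (PySem.Str.lower g) = true
  · rw [if_pos h7]; exact Or.inr (Or.inr (Or.inr (Or.inr (Or.inr (Or.inr (Or.inr (Or.inl rfl)))))))
  rw [if_neg h7]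
  by_cases h8 : PySem.Str.isIn "12th" (PySem.Str.lower g) = true
  · rw [if_pos h8]; exact Or.inr (Or.inr (Or.inr (Or.inr (Or.inr (Or.inr (Or.inr (Or.inr (Or.inl rfl))))))))
  rw [if_neg h8]
  by_cases h9 : PySem.Str.isIn "prealgebra" (PySem.Str.lower g) = true
  · rw [if_pos h9]; exact Or.inr (Or.inr (Or.inr (Or.inr (Or.inr (Or.inr (Or.inr (Or.inr (Or.inr (Or.inl rfl)))))))))
  rw [if_neg h9]
  by_cases h10 : PySem.Str.isIn "algebra 2" (PySem.Str.lower g) = true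
  · rw [if_pos h10]; exact Or.inr (Or.inr (Or.inr (Or.inr (Or.inr (Or.inr (Or.inr (Or.inr (Or.inr (Or.inr (Or.inl rfl))))))))))
  rw [if_neg h10]
  by_cases h11 : PySem.Str.isIn "algebra" (PySem.Str.lower g) = true
  · rw [if_pos h11]; exact Or.inr (Or.inr (Or.inr (Or.inr (Or.inr (Or.inr (Or.inr (Or.inr (Or.inr (Or.inr (Or.inr (Or.inl rfl)))))))))))
  rw [if_neg h11]
  by_cases h12 : PySem.Str.isIn "geometry" (PySem.Str.lower g) = true
  · rw [if_pos h12]; exact Or.inr (Or.inr (Or.inr (Or.inr (Or.inr (Or.inr (Or.inr (Or.inr (Or.inr (Or.inr (Or.inr (Or.inr (Or.inl rfl))))))))))))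
  rw [if_neg h12]
  by_cases h13 : PySem.Str.isIn "precalculus" (PySem.Str.lower g) = true
  · rw [if_pos h13]; exact Or.inr (Or.inr (Or.inr (Or.inr (Or.inr (Or.inr (Or.inr (Or.inr (Or.inr (Or.inr (Or.inr (Or.inr (Or.inr (Or.inl rfl)))))))))))))
  rw [if_neg h13]
  by_cases h14 : PySem.Str.isIn "calculus" (PySem.Str.lower g) = true
  · rw [if_pos h14]; exact Or.inr (Or.inr (Or.inr (Or.inr (Or.inr (Or.inr (Or.inr (Or.inr (Or.inr (Or.inr (Or.inr (Or.inr (Or.inr (Or.inr (Or.inl rfl))))))))))))))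
  rw [if_neg h14]
  exact Or.inr (Or.inr (Or.inr (Or.inr (Or.inr (Or.inr (Or.inr (Or.inr (Or.inr (Or.inr (Or.inr (Or.inr (Or.inr (Or.inr (Or.inr (rfl)))))))))))))))

-- ===== VERDICT =====
theorem topic_buckets_for_grade_spec : Claim_equal_topic_buckets_for_grade := by
  intro grade _
  unfold Spec_topic_buckets_for_grade topic_buckets_for_grade topic_buckets_for_grade_alt
  rcases subs_cases grade with h | h | h | h | h | h | h | h | h | h | h | h | h | h | h | h <;>
    rw [h] <;> rfl
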